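-- pv_equiv track=rewrite | github.com/fateddie/asksharon_ai_blueprint | assistant/modules/fitness/workout_generator.py | _filter_by_difficulty
-- ===== SOURCE A (Python) =====
-- from typing import Optional, Dict, Any, List
--
-- def _filter_by_difficulty(exercises: List[Dict], fitness_level: str) -> List[Dict]:
--     """Filter exercises appropriate for fitness level."""
--     level_map = {"beginner": 1, "intermediate": 2, "advanced": 3}
--     user_level = level_map.get(fitness_level, 2)
--
--     # Map exercise difficulty strings to numbers
--     def get_difficulty(ex):
--         diff = ex.get("difficulty_level", "intermediate")
--         return level_map.get(diff, 2)
--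
--     # Include exercises at or below user level, with preference for matching level
--     appropriate = [e for e in exercises if get_difficulty(e) <= user_level]
--     if not appropriate:
--         appropriate = exercises
--
--     # Sort by relevance to user level
--     appropriate.sort(key=lambda e: abs(get_difficulty(e) - user_level))
--
--     return appropriate
-- ===== SOURCE B (Python) =====
-- from typing import Optional, Dict, Any, List
--
-- def _filter_by_difficulty(exercises: List[Dict], fitness_level: str) -> List[Dict]:
--     """Filter exercises appropriate for fitness level (bucket version)."""
--     level_map = {"beginner": 1, "intermediate": 2, "advanced": 3}
--     user_level = level_map.get(fitness_level, 2)
--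
--     def get_difficulty(ex):
--         return level_map.get(ex.get("difficulty_level", "intermediate"), 2)
--
--     appropriate = [e for e in exercises if get_difficulty(e) <= user_level]
--     pool = appropriate or exercises
--
--     # Distances are always 0, 1 or 2: bucket instead of sorting.
--     buckets = [[], [], []]
--     for e in pool:
--         buckets[abs(get_difficulty(e) - user_level)].append(e)
--     return buckets[0] + buckets[1] + buckets[2]
-- ===== Notes on version B (the rewrite author's own statement) =====
-- stated objective: alternative
-- what changed: Replaces the comparison sort keyed by abs(difficulty-user_level) with a single-pass bucket pass over the three possible distances 0/1/2, concatenating the buckets in order (stability for free); A additionally sorts the caller's list in place in the fallback branch, B never mutates its argument (equivalence is about the return value).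
import Mathlib
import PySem

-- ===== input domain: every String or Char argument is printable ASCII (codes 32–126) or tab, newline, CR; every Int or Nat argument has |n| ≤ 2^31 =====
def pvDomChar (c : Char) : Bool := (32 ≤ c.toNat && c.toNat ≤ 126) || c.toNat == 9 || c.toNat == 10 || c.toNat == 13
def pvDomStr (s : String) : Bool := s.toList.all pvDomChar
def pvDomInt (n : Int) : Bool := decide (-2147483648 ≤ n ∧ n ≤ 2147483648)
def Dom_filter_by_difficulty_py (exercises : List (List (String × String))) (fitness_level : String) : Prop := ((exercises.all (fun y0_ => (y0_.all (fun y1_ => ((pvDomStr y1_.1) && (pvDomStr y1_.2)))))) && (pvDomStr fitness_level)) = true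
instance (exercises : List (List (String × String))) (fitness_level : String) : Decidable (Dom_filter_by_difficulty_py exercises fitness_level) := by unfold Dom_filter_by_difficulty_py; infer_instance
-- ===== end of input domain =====

-- B replaces A's sort keyed by abs(difficulty-user_level) with one bucketing pass over the
-- three possible distances 0/1/2 (objective: alternative). Equivalence is about the RETURN
-- value only: A sorts the caller's list in place in its fallback branch; B never mutates
-- its argument.

-- ===== PORT A =====
-- shared helpers (both Pythons define level_map and get_difficulty identically)
def pvLevelMap : PySem.Dict String Int := ⟨[("beginner", 1), ("intermediate", 2), ("advanced", 3)]⟩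

def pvGetDifficulty (ex : List (String × String)) : Int :=
  PySem.Dict.getD pvLevelMap (PySem.Dict.getD ⟨ex⟩ "difficulty_level" "intermediate") 2

def filter_by_difficulty_py (exercises : List (List (String × String))) (fitness_level : String) : List (List (String × String)) :=
  let user_level := PySem.Dict.getD pvLevelMap fitness_level 2
  let appropriate := exercises.filter (fun e => decide (pvGetDifficulty e ≤ user_level))
  let appropriate := if appropriate.isEmpty then exercises else appropriate
  PySem.List.sorted appropriate (fun e => |pvGetDifficulty e - user_level|) false

-- ===== PORT B =====
-- one step of B's bucketing loop: append e to the bucket of its distance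
def pvBucketStep (user_level : Int)
    (b : List (List (String × String)) × List (List (String × String)) × List (List (String × String)))
    (e : List (String × String)) :
    List (List (String × String)) × List (List (String × String)) × List (List (String × String)) :=
  let d := |pvGetDifficulty e - user_level|
  if d = 0 then (b.1 ++ [e], b.2.1, b.2.2)
  else if d = 1 then (b.1, b.2.1 ++ [e], b.2.2)
  else (b.1, b.2.1, b.2.2 ++ [e])

def filter_by_difficulty_py_alt (exercises : List (List (String × String))) (fitness_level : String) : List (List (String × String)) :=
  let user_level := PySem.Dict.getD pvLevelMap fitness_level 2
  let appropriate := exercises.filter (fun e => decide (pvGetDifficulty e ≤ user_level))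
  let pool := if appropriate.isEmpty then exercises else appropriate
  let b := pool.foldl (pvBucketStep user_level) ([], [], [])
  b.1 ++ b.2.1 ++ b.2.2

-- ===== PRECONDITION & SPEC =====
def Spec_filter_by_difficulty_py (exercises : List (List (String × String))) (fitness_level : String) (out : List (List (String × String))) : Prop := out = filter_by_difficulty_py_alt exercises fitness_level
instance (exercises : List (List (String × String))) (fitness_level : String) (out : List (List (String × String))) : Decidable (Spec_filter_by_difficulty_py exercises fitness_level out) := by unfold Spec_filter_by_difficulty_py; infer_instance

-- ===== CLAIM (what is proved, stated in full; the proofs are below) =====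
def Claim_equal_filter_by_difficulty_py : Prop := ∀ (exercises : List (List (String × String))) (fitness_level : String), Dom_filter_by_difficulty_py exercises fitness_level → Spec_filter_by_difficulty_py exercises fitness_level (filter_by_difficulty_py exercises fitness_level)

-- ===== LEMMAS AND PROOFS =====

-- any lookup in level_map (with default 2) yields 1, 2 or 3
theorem pvLevelLookup (s : String) :
    PySem.Dict.getD pvLevelMap s 2 = 1 ∨ PySem.Dict.getD pvLevelMap s 2 = 2 ∨ PySem.Dict.getD pvLevelMap s 2 = 3 := by
  simp only [PySem.Dict.getD, PySem.Dict.get?, pvLevelMap, List.find?]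
  by_cases h1 : (("beginner" : String) == s) = true <;>
    by_cases h2 : (("intermediate" : String) == s) = true <;>
      by_cases h3 : (("advanced" : String) == s) = true <;>
        simp [h1, h2, h3]

theorem pvKeyRange (e : List (String × String)) (u : Int)
    (hu : u = 1 ∨ u = 2 ∨ u = 3) :
    |pvGetDifficulty e - u| = 0 ∨ |pvGetDifficulty e - u| = 1 ∨ |pvGetDifficulty e - u| = 2 := by
  have hd := pvLevelLookup (PySem.Dict.getD ⟨e⟩ "difficulty_level" "intermediate")
  unfold pvGetDifficulty
  rcases hd with h | h | h <;> rcases hu with h' | h' | h' <;> rw [h, h'] <;> decide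

theorem pvInsertBy_front {α : Type} (before : α → α → Bool) (x : α) (ys : List α)
    (h : ∀ y ∈ ys, before x y = true) :
    PySem.List.insertBy before x ys = x :: ys := by
  cases ys with
  | nil => rfl
  | cons y t => simp [PySem.List.insertBy, h y (by simp)]

theorem pvInsertBy_append_left {α : Type} (before : α → α → Bool) (x : α) (as bs : List α)
    (h : ∀ y ∈ as, before x y = false) :
    PySem.List.insertBy before x (as ++ bs) = as ++ PySem.List.insertBy before x bs := by
  induction as with
  | nil => rfl
  | cons a t ih =>
      have ha := h a (by simp)
      simp [PySem.List.insertBy, ha, ih (fun y hy => h y (by simp [hy]))]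

-- the insertion-sort fold over a list whose keys lie in {0,1,2} builds the three buckets
theorem pvFoldInsert {α : Type} (key : α → Int) (l : List α) (b0 b1 b2 : List α)
    (hl : ∀ e ∈ l, key e = 0 ∨ key e = 1 ∨ key e = 2)
    (h0 : ∀ e ∈ b0, key e = 0) (h1 : ∀ e ∈ b1, key e = 1) (h2 : ∀ e ∈ b2, key e = 2) :
    l.foldl (fun acc x => PySem.List.insertBy (fun a b => decide (key a < key b)) x acc) (b0 ++ (b1 ++ b2))
      = (b0 ++ l.filter (fun e => decide (key e = 0))) ++
        ((b1 ++ l.filter (fun e => decide (key e = 1))) ++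
         (b2 ++ l.filter (fun e => decide (key e = 2)))) := by
  induction l generalizing b0 b1 b2 with
  | nil => simp
  | cons x t ih =>
      have hx := hl x (by simp)
      have hlt : ∀ e ∈ t, key e = 0 ∨ key e = 1 ∨ key e = 2 := fun e he => hl e (by simp [he])
      rcases hx with hx | hx | hx
      · have step : PySem.List.insertBy (fun a b => decide (key a < key b)) x (b0 ++ (b1 ++ b2))
            = (b0 ++ [x]) ++ (b1 ++ b2) := by
          rw [pvInsertBy_append_left _ _ _ _ (fun y hy => by simp [h0 y hy, hx]),
              pvInsertBy_front _ _ _ (fun y hy => by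
                rcases List.mem_append.mp hy with h | h
                · simp [h1 y h, hx]
                · simp [h2 y h, hx])]
          simp
        simp only [List.foldl_cons, step]
        rw [ih (b0 ++ [x]) b1 b2 hlt
            (fun e he => by rcases List.mem_append.mp he with h | h
                            · exact h0 e h
                            · simp at h; simpa [h] using hx) h1 h2]
        simp [hx]
      · have step : PySem.List.insertBy (fun a b => decide (key a < key b)) x (b0 ++ (b1 ++ b2))
            = b0 ++ ((b1 ++ [x]) ++ b2) := by
          rw [pvInsertBy_append_left _ _ _ _ (fun y hy => by simp [h0 y hy, hx]),
              pvInsertBy_append_left _ _ _ _ (fun y hy => by simp [h1 y hy, hx]),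
              pvInsertBy_front _ _ _ (fun y hy => by simp [h2 y hy, hx])]
          simp
        simp only [List.foldl_cons, step]
        rw [ih b0 (b1 ++ [x]) b2 hlt h0
            (fun e he => by rcases List.mem_append.mp he with h | h
                            · exact h1 e h
                            · simp at h; simpa [h] using hx) h2]
        simp [hx]
      · have step : PySem.List.insertBy (fun a b => decide (key a < key b)) x (b0 ++ (b1 ++ b2))
            = b0 ++ (b1 ++ (b2 ++ [x])) := by
          rw [PySem.List.insertBy_of_forall_not_before _ _ _ (fun y hy => by
            rcases List.mem_append.mp hy with h | h
            · simp [h0 y h, hx]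
            · rcases List.mem_append.mp h with h | h
              · simp [h1 y h, hx]
              · simp [h2 y h, hx])]
          simp
        simp only [List.foldl_cons, step]
        rw [ih b0 b1 (b2 ++ [x]) hlt h0 h1
            (fun e he => by rcases List.mem_append.mp he with h | h
                            · exact h2 e h
                            · simp at h; simpa [h] using hx)]
        simp [hx]

-- B's bucketing fold computes the three filters
theorem pvFoldBucket (u : Int) (l : List (List (String × String)))
    (b0 b1 b2 : List (List (String × String))) :
    l.foldl (pvBucketStep u) (b0, b1, b2)
      = (b0 ++ l.filter (fun e => decide (|pvGetDifficulty e - u| = 0)),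
         b1 ++ l.filter (fun e => decide (|pvGetDifficulty e - u| = 1)),
         b2 ++ l.filter (fun e => decide (¬(|pvGetDifficulty e - u| = 0) ∧ ¬(|pvGetDifficulty e - u| = 1)))) := by
  induction l generalizing b0 b1 b2 with
  | nil => simp
  | cons x t ih =>
      simp only [List.foldl_cons, pvBucketStep]
      split_ifs with hx0 hx1
      · rw [ih]
        simp [abs_eq_zero.mp hx0]
      · rw [ih]
        have h0 : pvGetDifficulty x - u ≠ 0 := fun h => by rw [h] at hx1; simp at hx1
        simp [hx1, h0]
      · rw [ih]
        have h0 : pvGetDifficulty x - u ≠ 0 := fun h => hx0 (by rw [h]; simp)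
        simp [hx1, h0]

-- ===== VERDICT (by name: the statement is the Claim_ definition above) =====
theorem filter_by_difficulty_py_spec : Claim_equal_filter_by_difficulty_py := by
  intro exercises fitness_level _dom
  unfold Spec_filter_by_difficulty_py filter_by_difficulty_py filter_by_difficulty_py_alt
  dsimp only
  set u := PySem.Dict.getD pvLevelMap fitness_level 2 with hu
  have hk : ∀ e : List (String × String),
      |pvGetDifficulty e - u| = 0 ∨ |pvGetDifficulty e - u| = 1 ∨ |pvGetDifficulty e - u| = 2 :=
    fun e => pvKeyRange e u (pvLevelLookup fitness_level)
  generalize (if (exercises.filter (fun e => decide (pvGetDifficulty e ≤ u))).isEmpty = true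
              then exercises
              else exercises.filter (fun e => decide (pvGetDifficulty e ≤ u))) = pool
  rw [PySem.List.sorted_eq_foldl_insertBy]
  have hA := pvFoldInsert (fun e => |pvGetDifficulty e - u|) pool [] [] [] (fun e _ => hk e)
      (by simp) (by simp) (by simp)
  simp only [List.nil_append] at hA
  rw [hA, pvFoldBucket]
  have hfc : pool.filter (fun e => !decide (pvGetDifficulty e - u = 0) && !decide (|pvGetDifficulty e - u| = 1))
      = pool.filter (fun e => decide (|pvGetDifficulty e - u| = 2)) := by
    apply List.filter_congr
    intro e _
    rcases hk e with h | h | h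
    · simp [abs_eq_zero.mp h]
    · have hne : pvGetDifficulty e - u ≠ 0 := fun h0 => by rw [h0] at h; simp at h
      simp [h, hne]
    · have hne : pvGetDifficulty e - u ≠ 0 := fun h0 => by rw [h0] at h; simp at h
      simp [h, hne]
  simp [hfc]
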